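-- pv_equiv track=rewrite | github.com/shashank231/imp-my-prep | Array/package_1/trapping_water.py | maxOnRight
-- ===== SOURCE A (Python) =====
-- def maxOnRight(arr):
--     lenArr = len(arr)
--     lastIndex = lenArr-1
--     answer = list()
--     currMax = arr[-1]
--     currMaxIndex = lastIndex
--     answer.append(currMaxIndex)
--
--     for index in range(lastIndex-1, -1, -1):
--         currEle = arr[index]
--         if currEle > currMax:
--             currMax = currEle
--             currMaxIndex = index
--         answer.append(currMaxIndex)
--
--     answer.reverse()
--     return answer
-- ===== SOURCE B (Python) =====
-- def maxOnRight(arr):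
--     n = len(arr)
--     answer = []
--     start = 0
--     while start < n:
--         m = start
--         for j in range(start + 1, n):
--             if arr[j] >= arr[m]:
--                 m = j
--         answer.extend([m] * (m - start + 1))
--         start = m + 1
--     return answer
-- ===== Notes on version B (the rewrite author's own statement) =====
-- stated objective: alternative
-- what changed: B repeatedly finds the last argmax of the remaining suffix with a forward scan and fills a whole block of the answer with that index, then recurses past it, instead of A's single right-to-left running-max pass followed by reverse().
import Mathlib
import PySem

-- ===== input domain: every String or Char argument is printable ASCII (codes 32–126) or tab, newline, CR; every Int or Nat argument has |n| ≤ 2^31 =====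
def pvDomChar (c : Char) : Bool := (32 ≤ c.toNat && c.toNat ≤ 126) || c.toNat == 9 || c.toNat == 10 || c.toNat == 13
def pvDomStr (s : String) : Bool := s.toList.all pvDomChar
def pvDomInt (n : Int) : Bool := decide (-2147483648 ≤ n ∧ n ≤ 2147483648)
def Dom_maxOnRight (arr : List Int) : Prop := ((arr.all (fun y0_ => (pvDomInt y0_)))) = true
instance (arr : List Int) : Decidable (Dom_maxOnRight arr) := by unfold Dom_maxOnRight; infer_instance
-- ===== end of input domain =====

-- B fills the answer block-by-block: it finds the last argmax of the remaining suffix by a forward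
-- scan, writes that index for every position up to it, and recurses past it (objective: alternative;
-- not faster — O(n^2) worst case vs A's O(n)).


-- ===== PORT A =====
-- one iteration of A's loop body over the state (currMax, currMaxIndex, answer)
def stepA (arr : List Int) (st : Int × Int × List Int) (index : Int) : Int × Int × List Int :=
  let currEle := PySem.List.pyGetD arr index 0
  if currEle > st.1 then (currEle, index, st.2.2 ++ [index])
  else (st.1, st.2.1, st.2.2 ++ [st.2.1])

def maxOnRight (arr : List Int) : List Int :=
  let lastIndex : Int := (arr.length : Int) - 1
  let init : Int × Int × List Int := (PySem.List.pyGetD arr (-1) 0, lastIndex, [lastIndex])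
  ((PySem.List.pyRange (lastIndex - 1) (-1) (-1)).foldl (stepA arr) init).2.2.reverse

-- ===== PORT B =====
-- the inner for loop: m = start; for j in range(start+1, n): if arr[j] >= arr[m]: m = j
-- (indices stay non-negative Nats, so range(start+1, n) is List.range' (start+1) (n-(start+1)))
def argmaxFrom (arr : List Int) (start : Nat) : Nat :=
  (List.range' (start + 1) (arr.length - (start + 1))).foldl
    (fun m j => if arr.getD j 0 ≥ arr.getD m 0 then j else m) start

-- the fold result is the initial accumulator or an element of the list (termination helper for bGo)
lemma foldl_choice (arr : List Int) :
    ∀ (l : List Nat) (m : Nat),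
      l.foldl (fun m j => if arr.getD j 0 ≥ arr.getD m 0 then j else m) m = m ∨
      l.foldl (fun m j => if arr.getD j 0 ≥ arr.getD m 0 then j else m) m ∈ l := by
  intro l
  induction l with
  | nil => intro m; left; rfl
  | cons a l ih =>
      intro m
      simp only [List.foldl_cons]
      rcases ih (if arr.getD a 0 ≥ arr.getD m 0 then a else m) with h | h
      · rw [h]; split_ifs with hc
        · right; exact List.mem_cons_self
        · left; rfl
      · right; exact List.mem_cons_of_mem _ h

lemma argmaxFrom_ge (arr : List Int) (start : Nat) : start ≤ argmaxFrom arr start := by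
  unfold argmaxFrom
  rcases foldl_choice arr (List.range' (start + 1) (arr.length - (start + 1))) start with h | h
  · omega
  · have := List.mem_range'_1.mp h; omega

-- the while loop: fill answer[start..m] with m, continue at m+1
def bGo (arr : List Int) (start : Nat) : List Int :=
  if _h : start < arr.length then
    let m := argmaxFrom arr start
    List.replicate (m - start + 1) (m : Int) ++ bGo arr (m + 1)
  else []
termination_by arr.length - start
decreasing_by
  have := argmaxFrom_ge arr start
  omega

def maxOnRight_alt (arr : List Int) : List Int := bGo arr 0

-- ===== PRECONDITION & SPEC =====
-- Pre_ excludes only the empty list, on which A raises IndexError (arr[-1]).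
def Pre_maxOnRight (arr : List Int) : Prop := arr ≠ []
instance (arr : List Int) : Decidable (Pre_maxOnRight arr) := by unfold Pre_maxOnRight; infer_instance
def pvWitness_maxOnRight : List Int := ([3, 1, 4, 1, 5])
def Spec_maxOnRight (arr : List Int) (out : List Int) : Prop := out = maxOnRight_alt arr
instance (arr : List Int) (out : List Int) : Decidable (Spec_maxOnRight arr out) := by unfold Spec_maxOnRight; infer_instance

-- ===== CLAIM (what is proved, stated in full; the proofs are below) =====
def Claim_equal_maxOnRight : Prop := ∀ (arr : List Int), Dom_maxOnRight arr → Pre_maxOnRight arr → Spec_maxOnRight arr (maxOnRight arr)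
-- ===== LEMMAS AND PROOFS =====

lemma argmaxFrom_lt (arr : List Int) (start : Nat) (h : start < arr.length) :
    argmaxFrom arr start < arr.length := by
  unfold argmaxFrom
  rcases foldl_choice arr (List.range' (start + 1) (arr.length - (start + 1))) start with h2 | h2
  · omega
  · have := List.mem_range'_1.mp h2; omega

-- best arr i = the largest index of a maximum of arr[i:], by the downward recurrence
def best (arr : List Int) (i : Nat) : Nat :=
  if h : i + 1 < arr.length then
    let b := best arr (i + 1)
    if arr.getD i 0 > arr.getD b 0 then i else b
  else i
termination_by arr.length - i

lemma best_last (arr : List Int) (i : Nat) (h : ¬ i + 1 < arr.length) : best arr i = i := by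
  rw [best]; simp [h]

lemma best_step (arr : List Int) (i : Nat) (h : i + 1 < arr.length) :
    best arr i = if arr.getD i 0 > arr.getD (best arr (i + 1)) 0 then i else best arr (i + 1) := by
  rw [best]; simp [h]

lemma best_eq_of_le (arr : List Int) :
    ∀ (i j : Nat), i ≤ j → j ≤ best arr i → best arr j = best arr i := by
  intro i j hij
  induction hd : j - i generalizing i with
  | zero =>
      have : i = j := by omega
      intro _; rw [this]
  | succ d ih =>
      intro hjb
      have hij' : i < j := by omega
      by_cases h : i + 1 < arr.length
      · rw [best_step arr i h] at hjb ⊢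
        split_ifs at hjb ⊢ with hc
        · omega
        · exact ih (i + 1) (by omega) (by omega) hjb
      · rw [best_last arr i h] at hjb; omega

-- the forward fold over range' s len (with s + len = n) lands on best arr s iff it beats the accumulator
lemma fold_range_best (arr : List Int) :
    ∀ (len s m : Nat), s + len = arr.length →
      (List.range' s len).foldl (fun m j => if arr.getD j 0 ≥ arr.getD m 0 then j else m) m =
        (if arr.getD (best arr s) 0 ≥ arr.getD m 0 ∧ s < arr.length then best arr s else m) := by
  intro len
  induction len with
  | zero => intro s m h; simp; omega
  | succ len ih =>
      intro s m h
      rw [List.range'_succ, List.foldl_cons, ih (s + 1) _ (by omega)]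
      by_cases hs : s + 1 < arr.length
      · rw [best_step arr s hs]
        split_ifs <;> first | rfl | omega
      · rw [best_last arr s hs]
        split_ifs <;> first | rfl | omega
  
lemma argmax_eq_best (arr : List Int) (start : Nat) (h : start < arr.length) :
    argmaxFrom arr start = best arr start := by
  unfold argmaxFrom
  rw [fold_range_best arr (arr.length - (start + 1)) (start + 1) start (by omega)]
  by_cases hs : start + 1 < arr.length
  · rw [best_step arr start hs]
    split_ifs <;> omega
  · rw [best_last arr start hs]
    split_ifs <;> simp_all

-- bGo produces exactly best over the remaining index range
lemma bGo_eq (arr : List Int) :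
    ∀ (start : Nat), bGo arr start =
      (List.range' start (arr.length - start)).map (fun i => (best arr i : Int)) := by
  intro start
  induction hn : arr.length - start using Nat.strong_induction_on generalizing start with
  | _ n ih =>
    subst hn
    rw [bGo]
    by_cases h : start < arr.length
    · simp only [dif_pos h]
      have hm := argmax_eq_best arr start h
      have hge := argmaxFrom_ge arr start
      have hlt := argmaxFrom_lt arr start h
      set m := argmaxFrom arr start with hmdef
      have hsplit : List.range' start (arr.length - start) =
          List.range' start (m - start + 1) ++ List.range' (m + 1) (arr.length - (m + 1)) := by
        have h1 : arr.length - start = (m - start + 1) + (arr.length - (m + 1)) := by omega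
        rw [h1, ← List.range'_append]
        congr 2
        omega
      rw [hsplit, List.map_append]
      congr 1
      · have hconst : ∀ i ∈ List.range' start (m - start + 1),
            ((best arr i : Nat) : Int) = (m : Int) := by
          intro i hi
          have hi' := List.mem_range'_1.mp hi
          have : best arr i = best arr start := best_eq_of_le arr start i (by omega) (by omega)
          rw [this, ← hm]
        rw [List.map_congr_left hconst]
        simp
      · exact ih (arr.length - (m + 1)) (by omega) (m + 1) rfl
    · simp only [dif_neg h]
      have h0 : arr.length - start = 0 := by omega
      rw [h0]
      simp

-- ===== A-side machinery: altGo reproduces A's answer list =====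
-- altGo arr k = the answer entries for positions (n-1-k) .. (n-1)
def altGo (arr : List Int) : Nat → List Int
  | 0 => [(arr.length : Int) - 1]
  | k + 1 =>
      let rest := altGo arr k
      let i : Int := (arr.length : Int) - 1 - ((k : Int) + 1)
      let j : Int := rest.headD 0
      (if PySem.List.pyGetD arr i 0 > PySem.List.pyGetD arr j 0 then i else j) :: rest

-- the loop state of A after it has processed indices n-2 down to i, expressed via altGo
def stateAt (arr : List Int) (i : Nat) : Int × Int × List Int :=
  (PySem.List.pyGetD arr ((altGo arr (arr.length - 1 - i)).headD 0) 0,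
   (altGo arr (arr.length - 1 - i)).headD 0,
   (altGo arr (arr.length - 1 - i)).reverse)

lemma stepA_stateAt (arr : List Int) (i : Nat) (hi : i + 1 < arr.length) :
    stepA arr (stateAt arr (i + 1)) (i : Int) = stateAt arr i := by
  have hk : arr.length - 1 - i = (arr.length - 1 - (i + 1)) + 1 := by omega
  have hcast : ((arr.length : Int) - 1 - (((arr.length - 1 - (i + 1) : Nat) : Int) + 1)) = (i : Int) := by
    have : ((arr.length - 1 - (i + 1) : Nat) : Int) = (arr.length : Int) - 2 - i := by omega
    omega
  simp only [stateAt, hk, altGo, hcast, stepA]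
  split_ifs with h <;> simp [PySem.List.pyGetD_natCast]

lemma loopA (arr : List Int) : ∀ (i : Nat), i < arr.length →
    (PySem.List.pyRange ((i : Int) - 1) (-1) (-1)).foldl (stepA arr) (stateAt arr i)
      = stateAt arr 0 := by
  intro i
  induction i with
  | zero =>
      intro _
      rw [PySem.List.pyRange_neg_one_eq_nil (by omega)]
      simp
  | succ i ih =>
      intro hi
      have h1 : ((i : Int) + 1 - 1) = (i : Int) := by omega
      have h2 : PySem.List.pyRange (i : Int) (-1) (-1)
          = (i : Int) :: PySem.List.pyRange ((i : Int) - 1) (-1) (-1) :=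
        PySem.List.pyRange_neg_one_cons (by omega)
      push_cast
      rw [h1, h2]
      simp only [List.foldl_cons]
      rw [stepA_stateAt arr i hi]
      exact ih (by omega)

lemma init_eq_stateAt (arr : List Int) (h : arr ≠ []) :
    ((PySem.List.pyGetD arr (-1) 0, (arr.length : Int) - 1, [(arr.length : Int) - 1])
      : Int × Int × List Int) = stateAt arr (arr.length - 1) := by
  have hneg : PySem.List.pyGetD arr (-1) 0 = PySem.List.pyGetD arr ((arr.length : Int) - 1) 0 := by
    have h1 : 0 < arr.length := List.length_pos_iff.mpr h
    rw [PySem.List.pyGetD_neg_ofNat arr 1 0 (by omega) (by omega)]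
    have : ((arr.length : Int) - 1) = ((arr.length - 1 : Nat) : Int) := by omega
    rw [this, PySem.List.pyGetD_natCast]
    simp [List.getD, List.getElem?_eq_getElem (by omega : arr.length - 1 < arr.length)]
  simp [stateAt, altGo, hneg]

-- altGo is best over the trailing index range
lemma altGo_eq_map_best (arr : List Int) :
    ∀ (k : Nat), k < arr.length →
      altGo arr k = (List.range' (arr.length - 1 - k) (k + 1)).map (fun i => (best arr i : Int)) := by
  intro k
  induction k with
  | zero =>
      intro h
      have : best arr (arr.length - 1) = arr.length - 1 := best_last arr _ (by omega)
      simp [altGo, this]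
      omega
  | succ k ih =>
      intro h
      have hrec := ih (by omega)
      have hi : ((arr.length : Int) - 1 - ((k : Int) + 1)) = ((arr.length - 2 - k : Nat) : Int) := by
        omega
      have hhead : (altGo arr k).headD 0 = ((best arr (arr.length - 1 - k) : Nat) : Int) := by
        rw [hrec, List.range'_succ]; simp
      have hb := best_step arr (arr.length - 2 - k) (by omega)
      have hidx : arr.length - 2 - k + 1 = arr.length - 1 - k := by omega
      rw [hidx] at hb
      simp only [altGo, hhead, hi, PySem.List.pyGetD_natCast]
      rw [hrec]
      have hsplit : List.range' (arr.length - 1 - (k + 1)) (k + 1 + 1) =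
          (arr.length - 2 - k) :: List.range' (arr.length - 1 - k) (k + 1) := by
        have e1 : arr.length - 1 - (k + 1) = arr.length - 2 - k := by omega
        have e2 : arr.length - 2 - k + 1 = arr.length - 1 - k := by omega
        rw [List.range'_succ, e1, e2]
      rw [hsplit, List.map_cons, hb]
      split_ifs <;> simp

-- ===== VERDICT (by name: the statement is the Claim_ definition above) =====
theorem maxOnRight_spec : Claim_equal_maxOnRight := by
  intro arr _ hpre
  unfold Spec_maxOnRight maxOnRight maxOnRight_alt
  have hn : 0 < arr.length := List.length_pos_iff.mpr hpre
  dsimp only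
  rw [init_eq_stateAt arr hpre]
  have hcast : ((arr.length : Int) - 1 - 1) = ((arr.length - 1 : Nat) : Int) - 1 := by omega
  rw [hcast, loopA arr (arr.length - 1) (by omega)]
  simp only [stateAt, List.reverse_reverse]
  rw [Nat.sub_zero, altGo_eq_map_best arr (arr.length - 1) (by omega), bGo_eq arr 0]
  have e1 : arr.length - 1 - (arr.length - 1) = 0 := by omega
  have e2 : arr.length - 1 + 1 = arr.length := by omega
  have e3 : arr.length - 0 = arr.length := by omega
  rw [e1, e2, e3]
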